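-- pv_equiv track=rewrite | github.com/yhSmiling/Named-entity-recognition | Named entity recognition/Named-entity-recognition.py | build_feature_space_model_1
-- ===== SOURCE A (Python) =====
-- from collections import Counter
--
-- def build_feature_space_model_1(label_model_1,word_model_1,state):
--
-- 	Phi_for_predict_model_1={s:{k:1 for k in word_model_1} for s in state}#build predict dictionary.Suppose all feature will be occured.
-- 	Phi_for_correct_model_1={s:{k:0 for k in word_model_1} for s in state}#build actural dictionary.All feature are set as 0 initially.
--
-- 	tuple_label_word_model_1=list(zip(label_model_1,word_model_1))#put single word and its corresponding label in a tuple in order to ease the statistic frequency of label-current word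
--
-- 	for i,j in Counter(tuple_label_word_model_1).items():
-- 		for o,p in Phi_for_correct_model_1.items():
-- 			for l,s in p.items():
-- 				if i[0]==o and i[1]==l:
-- 					Phi_for_correct_model_1[o][l]=j#if current word-current label occured, the value will be set as the frequence.
--
-- 	return Phi_for_predict_model_1,Phi_for_correct_model_1
-- ===== SOURCE B (Python) =====
-- def build_feature_space_model_1(label_model_1, word_model_1, state):
--     Phi_for_predict_model_1 = {s: {k: 1 for k in word_model_1} for s in state}
--     Phi_for_correct_model_1 = {s: {k: 0 for k in word_model_1} for s in state}
--     for label, word in zip(label_model_1, word_model_1):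
--         if label in Phi_for_correct_model_1 and word in Phi_for_correct_model_1[label]:
--             Phi_for_correct_model_1[label][word] += 1
--     return Phi_for_predict_model_1, Phi_for_correct_model_1
-- ===== Notes on version B (the rewrite author's own statement) =====
-- stated objective: faster
-- what changed: B drops the Counter table and the triple-nested scan that compares every counted pair against every cell of the nested dict, and instead makes one guarded pass over zip(label, word) incrementing the matching cell directly.
import Mathlib
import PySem

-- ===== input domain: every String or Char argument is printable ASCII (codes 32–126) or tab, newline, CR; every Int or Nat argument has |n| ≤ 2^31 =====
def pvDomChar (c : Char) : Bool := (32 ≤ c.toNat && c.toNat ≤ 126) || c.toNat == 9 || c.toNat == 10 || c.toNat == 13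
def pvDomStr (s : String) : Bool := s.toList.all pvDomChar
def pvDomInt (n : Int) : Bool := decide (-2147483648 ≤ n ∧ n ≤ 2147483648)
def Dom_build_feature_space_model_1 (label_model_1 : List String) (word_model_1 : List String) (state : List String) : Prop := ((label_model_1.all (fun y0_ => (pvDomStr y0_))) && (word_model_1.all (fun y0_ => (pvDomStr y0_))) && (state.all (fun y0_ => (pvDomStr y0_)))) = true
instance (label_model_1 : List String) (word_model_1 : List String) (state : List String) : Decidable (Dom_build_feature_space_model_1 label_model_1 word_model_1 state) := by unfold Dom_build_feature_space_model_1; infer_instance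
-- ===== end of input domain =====

-- B replaces A's Counter table plus triple-nested scan over every dict cell with one guarded
-- single pass over zip(label, word) that increments the matching cell (objective: faster).

-- shared helpers: both Pythons build the two nested dicts with the same comprehensions
def pvInner (ws : List String) (v : Int) : PySem.Dict String Int :=
  ws.foldl (fun d k => d.insert k v) PySem.Dict.empty

def pvOuter (ws st : List String) (v : Int) : PySem.Dict String (PySem.Dict String Int) :=
  st.foldl (fun d s => d.insert s (pvInner ws v)) PySem.Dict.empty

def pvToAssoc (d : PySem.Dict String (PySem.Dict String Int)) : List (String × List (String × Int)) :=
  d.items.map (fun p => (p.1, p.2.items))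

-- ===== PORT A =====
-- the triple-nested 'for i,j in Counter(...).items(): for o,p in ...items(): for l,s in p.items():'
-- (the Python loop bodies only read the keys i, o, l, never the mutated values, so folding over
-- the item snapshots is exact)
def pvTripleStep (pr : String × String) (cnt : Int)
    (acc : PySem.Dict String (PySem.Dict String Int)) : PySem.Dict String (PySem.Dict String Int) :=
  acc.items.foldl (fun acc2 op =>
    op.2.items.foldl (fun acc3 lp =>
      if pr.1 == op.1 && pr.2 == lp.1 then
        acc3.modify op.1 PySem.Dict.empty (fun inn => inn.insert lp.1 cnt)
      else acc3) acc2) acc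

def build_feature_space_model_1 (label_model_1 : List String) (word_model_1 : List String) (state : List String) : (List (String × List (String × Int))) × (List (String × List (String × Int))) :=
  let predict := pvOuter word_model_1 state 1
  let correct0 := pvOuter word_model_1 state 0
  let tuples := label_model_1.zip word_model_1
  let correct := (PySem.Dict.counter tuples).items.foldl (fun acc ic => pvTripleStep ic.1 ic.2 acc) correct0
  (pvToAssoc predict, pvToAssoc correct)

-- ===== PORT B =====
-- 'if label in Phi_for_correct and word in Phi_for_correct[label]: Phi_for_correct[label][word] += 1'
def pvBStep (c : PySem.Dict String (PySem.Dict String Int)) (lw : String × String) :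
    PySem.Dict String (PySem.Dict String Int) :=
  if c.contains lw.1 && (c.getD lw.1 PySem.Dict.empty).contains lw.2 then
    c.modify lw.1 PySem.Dict.empty (fun inn => inn.insert lw.2 (inn.getD lw.2 0 + 1))
  else c

def build_feature_space_model_1_alt (label_model_1 : List String) (word_model_1 : List String) (state : List String) : (List (String × List (String × Int))) × (List (String × List (String × Int))) :=
  let predict := pvOuter word_model_1 state 1
  let correct := (label_model_1.zip word_model_1).foldl pvBStep (pvOuter word_model_1 state 0)
  (pvToAssoc predict, pvToAssoc correct)

-- ===== PRECONDITION & SPEC =====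
def Spec_build_feature_space_model_1 (label_model_1 : List String) (word_model_1 : List String) (state : List String) (out : (List (String × List (String × Int))) × (List (String × List (String × Int)))) : Prop := out = build_feature_space_model_1_alt label_model_1 word_model_1 state
instance (label_model_1 : List String) (word_model_1 : List String) (state : List String) (out : (List (String × List (String × Int))) × (List (String × List (String × Int)))) : Decidable (Spec_build_feature_space_model_1 label_model_1 word_model_1 state out) := by unfold Spec_build_feature_space_model_1; infer_instance

-- ===== CLAIM (what is proved, stated in full; the proofs are below) =====
def Claim_equal_build_feature_space_model_1 : Prop := ∀ (label_model_1 : List String) (word_model_1 : List String) (state : List String), Dom_build_feature_space_model_1 label_model_1 word_model_1 state → Spec_build_feature_space_model_1 label_model_1 word_model_1 state (build_feature_space_model_1 label_model_1 word_model_1 state)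

-- ===== LEMMAS AND PROOFS =====

-- value of cell (q.1, q.2) in the nested dict
def pvVal (d : PySem.Dict String (PySem.Dict String Int)) (q : String × String) : Int :=
  (d.getD q.1 PySem.Dict.empty).getD q.2 0

-- structural invariant kept by both loops: outer keys are set(state), each inner dict's keys set(word)
def pvWf (st ws : List String) (d : PySem.Dict String (PySem.Dict String Int)) : Prop :=
  d.keys = PySem.Set.ofList st ∧
  ∀ o ∈ PySem.Set.ofList st, (d.getD o PySem.Dict.empty).keys = PySem.Set.ofList ws

-- the guard as a proposition on the input lists
abbrev pvG (st ws : List String) (q : String × String) : Prop := q.1 ∈ st ∧ q.2 ∈ ws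

theorem pv_getD_foldl_insert_const {ν : Type} (xs : List String) (v : ν) (d : PySem.Dict String ν)
    (o : String) (e : ν) :
    (xs.foldl (fun d k => d.insert k v) d).getD o e = if o ∈ xs then v else d.getD o e := by
  induction xs generalizing d with
  | nil => simp
  | cons x xs ih =>
      simp only [List.foldl_cons, ih, PySem.Dict.getD_insert, List.mem_cons]
      by_cases h1 : o ∈ xs <;> by_cases h2 : o = x <;> simp [h1, h2]

theorem pv_keys_inner (ws : List String) (v : Int) : (pvInner ws v).keys = PySem.Set.ofList ws := by
  unfold pvInner
  rw [PySem.Dict.keys_foldl_insert]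
  simp [PySem.Set.update_nil_left]

theorem pv_wf_outer (st ws : List String) (v : Int) : pvWf st ws (pvOuter ws st v) := by
  constructor
  · unfold pvOuter
    rw [PySem.Dict.keys_foldl_insert]
    simp [PySem.Set.update_nil_left]
  · intro o ho
    unfold pvOuter
    rw [pv_getD_foldl_insert_const]
    rw [PySem.Set.mem_ofList] at ho
    simp [ho, pv_keys_inner]

theorem pv_val_outer0 (st ws : List String) (q : String × String) :
    pvVal (pvOuter ws st 0) q = 0 := by
  unfold pvVal pvOuter
  rw [pv_getD_foldl_insert_const]
  by_cases h : q.1 ∈ st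
  · simp only [h, if_true]
    unfold pvInner
    rw [pv_getD_foldl_insert_const]
    by_cases h2 : q.2 ∈ ws <;> simp [h2]
  · simp [h]

theorem pv_guard_eval (st ws : List String) (d : PySem.Dict String (PySem.Dict String Int))
    (h : pvWf st ws d) (q : String × String) :
    (d.contains q.1 && (d.getD q.1 PySem.Dict.empty).contains q.2) = decide (pvG st ws q) := by
  obtain ⟨hk, hi⟩ := h
  by_cases h1 : q.1 ∈ st
  · have hmem : q.1 ∈ d.keys := by rw [hk, PySem.Set.mem_ofList]; exact h1
    have hc : d.contains q.1 = true := (PySem.Dict.contains_iff_mem_keys d q.1).mpr hmem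
    have hik := hi q.1 (by rw [PySem.Set.mem_ofList]; exact h1)
    have hc2 : (d.getD q.1 PySem.Dict.empty).contains q.2 = decide (q.2 ∈ ws) := by
      by_cases h2 : q.2 ∈ ws
      · simp [h2, PySem.Dict.contains_iff_mem_keys, hik, PySem.Set.mem_ofList]
      · simp only [h2, decide_false]
        rw [Bool.eq_false_iff]
        intro hcon
        have := (PySem.Dict.contains_iff_mem_keys _ _).mp hcon
        rw [hik, PySem.Set.mem_ofList] at this
        exact h2 this
    simp [hc, hc2, pvG, h1]
  · have hc : d.contains q.1 = false := by
      rw [Bool.eq_false_iff]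
      intro hcon
      have := (PySem.Dict.contains_iff_mem_keys _ _).mp hcon
      rw [hk, PySem.Set.mem_ofList] at this
      exact h1 this
    simp [hc, pvG, h1]
def pvModIns (pr : String × String) (X : PySem.Dict String Int → Int)
    (d : PySem.Dict String (PySem.Dict String Int)) : PySem.Dict String (PySem.Dict String Int) :=
  if d.contains pr.1 && (d.getD pr.1 PySem.Dict.empty).contains pr.2 then
    d.modify pr.1 PySem.Dict.empty (fun inn => inn.insert pr.2 (X inn))
  else d

theorem pv_wf_modIns (st ws : List String) (d : PySem.Dict String (PySem.Dict String Int))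
    (h : pvWf st ws d) (pr : String × String) (X : PySem.Dict String Int → Int) :
    pvWf st ws (pvModIns pr X d) := by
  unfold pvModIns
  by_cases hg : (d.contains pr.1 && (d.getD pr.1 PySem.Dict.empty).contains pr.2) = true
  · simp only [hg, if_true]
    obtain ⟨hk, hi⟩ := h
    have hcon2 : (d.getD pr.1 PySem.Dict.empty).contains pr.2 = true := by
      rcases Bool.and_eq_true_iff.mp hg with ⟨_, h2⟩; exact h2
    constructor
    · rw [PySem.Dict.keys_modify, PySem.Dict.keys_insert_of_contains]
      · exact hk
      · rcases Bool.and_eq_true_iff.mp hg with ⟨h1, _⟩; exact h1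
    · intro o ho
      rw [PySem.Dict.getD_modify]
      by_cases he : o = pr.1
      · simp only [he, if_true]
        rw [PySem.Dict.keys_insert_of_contains _ _ hcon2]
        exact he ▸ hi o ho
      · simp only [he, if_false]
        exact hi o ho
  · simp only [hg]
    exact h

theorem pv_val_modIns (st ws : List String) (d : PySem.Dict String (PySem.Dict String Int))
    (h : pvWf st ws d) (pr : String × String) (X : PySem.Dict String Int → Int) (q : String × String) :
    pvVal (pvModIns pr X d) q =
      if q = pr ∧ pvG st ws pr then X (d.getD pr.1 PySem.Dict.empty) else pvVal d q := by
  unfold pvModIns pvVal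
  rw [pv_guard_eval st ws d h pr]
  by_cases hg : pvG st ws pr
  · rw [if_pos (by simpa using hg)]
    rw [PySem.Dict.getD_modify]
    by_cases h1 : q.1 = pr.1
    · rw [if_pos h1, PySem.Dict.getD_insert]
      by_cases h2 : q.2 = pr.2
      · rw [if_pos h2, if_pos ⟨Prod.ext h1 h2, hg⟩]
      · rw [if_neg h2, if_neg (fun hc => h2 (by rw [hc.1])), h1]
    · rw [if_neg h1, if_neg (fun hc => h1 (by rw [hc.1]))]
  · rw [if_neg (by simpa using hg)]
    simp [hg]
theorem pv_bstep_eq (c : PySem.Dict String (PySem.Dict String Int)) (lw : String × String) :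
    pvBStep c lw = pvModIns lw (fun inn => inn.getD lw.2 0 + 1) c := rfl

theorem pv_wf_foldB (st ws : List String) (ts : List (String × String))
    (d : PySem.Dict String (PySem.Dict String Int)) (h : pvWf st ws d) :
    pvWf st ws (ts.foldl pvBStep d) := by
  induction ts generalizing d with
  | nil => exact h
  | cons t ts ih =>
      simp only [List.foldl_cons, pv_bstep_eq]
      exact ih _ (pv_wf_modIns st ws d h t _)

theorem pv_val_foldB (st ws : List String) (ts : List (String × String))
    (d : PySem.Dict String (PySem.Dict String Int)) (h : pvWf st ws d) (q : String × String) :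
    pvVal (ts.foldl pvBStep d) q = pvVal d q + if pvG st ws q then (ts.count q : Int) else 0 := by
  induction ts generalizing d with
  | nil => simp
  | cons t ts ih =>
      simp only [List.foldl_cons, pv_bstep_eq]
      rw [ih _ (pv_wf_modIns st ws d h t _), pv_val_modIns st ws d h t _ q, List.count_cons]
      by_cases he : q = t
      · subst he
        by_cases hg : pvG st ws q
        · rw [if_pos ⟨rfl, hg⟩, if_pos hg, if_pos hg]
          unfold pvVal
          simp only [beq_self_eq_true, if_true]
          push_cast; ring
        · rw [if_neg (fun hc => hg hc.2), if_neg hg, if_neg hg]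
      · rw [if_neg (fun hc => he hc.1)]
        simp [Ne.symm he]
theorem pv_infold_nomatch (pr : String × String) (o : String) (cnt : Int)
    (lps : List (String × Int)) (a0 : PySem.Dict String (PySem.Dict String Int))
    (h : ∀ lp ∈ lps, (pr.1 == o && pr.2 == lp.1) = false) :
    lps.foldl (fun a3 lp => if pr.1 == o && pr.2 == lp.1 then
        a3.modify o PySem.Dict.empty (fun inn => inn.insert lp.1 cnt) else a3) a0 = a0 := by
  induction lps generalizing a0 with
  | nil => rfl
  | cons lp lps ih =>
      simp only [List.foldl_cons, h lp (List.mem_cons_self)]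
      exact ih a0 (fun x hx => h x (List.mem_cons_of_mem _ hx))

theorem pv_infold (pr : String × String) (o : String) (cnt : Int)
    (lps : List (String × Int)) (hnd : (lps.map Prod.fst).Nodup)
    (a0 : PySem.Dict String (PySem.Dict String Int)) :
    lps.foldl (fun a3 lp => if pr.1 == o && pr.2 == lp.1 then
        a3.modify o PySem.Dict.empty (fun inn => inn.insert lp.1 cnt) else a3) a0 =
      if pr.1 == o && lps.any (fun lp => pr.2 == lp.1) then
        a0.modify pr.1 PySem.Dict.empty (fun inn => inn.insert pr.2 cnt)
      else a0 := by
  induction lps generalizing a0 with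
  | nil => simp
  | cons lp lps ih =>
      simp only [List.map_cons, List.nodup_cons] at hnd
      by_cases hm : (pr.1 == o && pr.2 == lp.1) = true
      · obtain ⟨ho, hl⟩ := Bool.and_eq_true_iff.mp hm
        have ho' : pr.1 = o := eq_of_beq ho
        have hl' : pr.2 = lp.1 := eq_of_beq hl
        simp only [List.foldl_cons, hm, if_true]
        rw [pv_infold_nomatch]
        · rw [if_pos (by simp [ho, hl])]
          rw [ho', hl']
        · intro x hx
          have : x.1 ≠ lp.1 := fun hh => hnd.1 (hh ▸ List.mem_map_of_mem hx)
          simp only [Bool.and_eq_false_iff]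
          right
          simp only [beq_eq_false_iff_ne, ne_eq, hl']
          exact fun hh => this hh.symm
      · simp only [List.foldl_cons, if_neg hm]
        rw [ih hnd.2 a0]
        congr 1
        cases hpo : (pr.1 == o) with
        | false => simp
        | true =>
            have hne : (pr.2 == lp.1) = false := by
              cases hpl : (pr.2 == lp.1) with
              | false => rfl
              | true => exact absurd (by simp [hpo, hpl]) hm
            simp [hne]
theorem pv_any_contains (dd : PySem.Dict String Int) (x : String) :
    (dd.items.any (fun lp => x == lp.1)) = dd.contains x := by
  rw [PySem.Dict.contains_eq_decide_mem_keys, Bool.eq_iff_iff]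
  simp [PySem.Dict.keys, List.any_eq_true, List.mem_map, beq_iff_eq]

theorem pv_keys_nodup_fst {ν : Type} (dd : PySem.Dict String ν) (h : dd.keys.Nodup) :
    (dd.items.map Prod.fst).Nodup := by
  simpa [PySem.Dict.keys] using h

theorem pv_midfold_nomatch (pr : String × String) (cnt : Int)
    (ops : List (String × PySem.Dict String Int))
    (h : ∀ op ∈ ops, (pr.1 == op.1) = false)
    (a0 : PySem.Dict String (PySem.Dict String Int)) :
    ops.foldl (fun a2 op => op.2.items.foldl (fun a3 lp => if pr.1 == op.1 && pr.2 == lp.1 then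
        a3.modify op.1 PySem.Dict.empty (fun inn => inn.insert lp.1 cnt) else a3) a2) a0 = a0 := by
  induction ops generalizing a0 with
  | nil => rfl
  | cons op ops ih =>
      simp only [List.foldl_cons]
      rw [pv_infold_nomatch pr op.1 cnt op.2.items a0
        (fun lp _ => by simp [h op List.mem_cons_self])]
      exact ih (fun x hx => h x (List.mem_cons_of_mem _ hx)) a0

theorem pv_midfold (pr : String × String) (cnt : Int)
    (ops : List (String × PySem.Dict String Int))
    (hnd : (ops.map Prod.fst).Nodup) (hin : ∀ op ∈ ops, op.2.keys.Nodup)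
    (a0 : PySem.Dict String (PySem.Dict String Int)) :
    ops.foldl (fun a2 op => op.2.items.foldl (fun a3 lp => if pr.1 == op.1 && pr.2 == lp.1 then
        a3.modify op.1 PySem.Dict.empty (fun inn => inn.insert lp.1 cnt) else a3) a2) a0 =
      if ops.any (fun op => op.1 == pr.1 && op.2.contains pr.2) then
        a0.modify pr.1 PySem.Dict.empty (fun inn => inn.insert pr.2 cnt)
      else a0 := by
  induction ops generalizing a0 with
  | nil => simp
  | cons op ops ih =>
      simp only [List.map_cons, List.nodup_cons] at hnd
      simp only [List.foldl_cons]
      rw [pv_infold pr op.1 cnt op.2.items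
        (pv_keys_nodup_fst _ (hin op List.mem_cons_self)) a0]
      by_cases hm : (pr.1 == op.1 && op.2.items.any (fun lp => pr.2 == lp.1)) = true
      · obtain ⟨ho, ha⟩ := Bool.and_eq_true_iff.mp hm
        have ho' : pr.1 = op.1 := eq_of_beq ho
        rw [if_pos hm]
        rw [pv_midfold_nomatch pr cnt ops (fun x hx => by
          have : x.1 ≠ op.1 := fun hh => hnd.1 (hh ▸ List.mem_map_of_mem hx)
          simp only [beq_eq_false_iff_ne, ne_eq, ho']
          exact fun hh => this hh.symm)]
        rw [if_pos]
        simp only [List.any_cons, Bool.or_eq_true]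
        left
        rw [← pv_any_contains]
        simp [ho', ha]
      · rw [if_neg hm, ih hnd.2 (fun x hx => hin x (List.mem_cons_of_mem _ hx)) a0]
        congr 1
        simp only [List.any_cons]
        have hhead : (op.1 == pr.1 && op.2.contains pr.2) = false := by
          rw [← pv_any_contains]
          cases hpo : (op.1 == pr.1) with
          | false => simp
          | true =>
              have : (pr.1 == op.1) = true := by
                rw [beq_iff_eq]; exact (eq_of_beq hpo).symm
              simp only [Bool.true_and]
              cases hany : (op.2.items.any (fun lp => pr.2 == lp.1)) with
              | false => rfl
              | true => exact absurd (by simp [this, hany]) hm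
        rw [hhead]
        simp
theorem pv_tripleStep_eq (st ws : List String) (d : PySem.Dict String (PySem.Dict String Int))
    (h : pvWf st ws d) (pr : String × String) (cnt : Int) :
    pvTripleStep pr cnt d = pvModIns pr (fun _ => cnt) d := by
  have hknd : d.keys.Nodup := by rw [h.1]; exact PySem.Set.nodup_ofList _
  have hin : ∀ op ∈ d.items, op.2.keys.Nodup := by
    intro op hmem
    have h1 : op.1 ∈ PySem.Set.ofList st := by
      rw [← h.1]; exact PySem.Dict.mem_keys_of_mem_items d hmem
    have h2 : d.getD op.1 PySem.Dict.empty = op.2 :=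
      PySem.Dict.getD_of_mem_items d hmem hknd PySem.Dict.empty
    rw [← h2, h.2 op.1 h1]
    exact PySem.Set.nodup_ofList _
  have hcond : d.items.any (fun op => op.1 == pr.1 && op.2.contains pr.2) =
      (d.contains pr.1 && (d.getD pr.1 PySem.Dict.empty).contains pr.2) := by
    rw [Bool.eq_iff_iff]
    simp only [List.any_eq_true, Bool.and_eq_true, beq_iff_eq]
    constructor
    · rintro ⟨op, hmem, h1, h2⟩
      refine ⟨(PySem.Dict.contains_iff_mem_keys d pr.1).mpr
        (h1 ▸ PySem.Dict.mem_keys_of_mem_items d hmem), ?_⟩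
      have h3 := PySem.Dict.getD_of_mem_items d hmem hknd PySem.Dict.empty
      rw [h1] at h3
      rw [h3]; exact h2
    · rintro ⟨h1, h2⟩
      have hk : pr.1 ∈ d.keys := (PySem.Dict.contains_iff_mem_keys d pr.1).mp h1
      simp only [PySem.Dict.keys, List.mem_map] at hk
      obtain ⟨op, hmem, hfst⟩ := hk
      refine ⟨op, hmem, hfst, ?_⟩
      have h3 := PySem.Dict.getD_of_mem_items d hmem hknd PySem.Dict.empty
      rw [hfst] at h3
      rw [h3] at h2; exact h2
  unfold pvTripleStep pvModIns
  rw [pv_midfold pr cnt d.items (pv_keys_nodup_fst _ hknd) hin d, hcond]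

theorem pv_wf_foldA (st ws : List String) (cs : List ((String × String) × Int))
    (d : PySem.Dict String (PySem.Dict String Int)) (h : pvWf st ws d) :
    pvWf st ws (cs.foldl (fun acc ic => pvTripleStep ic.1 ic.2 acc) d) := by
  induction cs generalizing d with
  | nil => exact h
  | cons ic cs ih =>
      simp only [List.foldl_cons]
      rw [pv_tripleStep_eq st ws d h]
      exact ih _ (pv_wf_modIns st ws d h ic.1 _)

theorem pv_val_foldA (st ws : List String) (tc : String × String → Int)
    (cs : List ((String × String) × Int)) (hnd : (cs.map Prod.fst).Nodup)
    (hc : ∀ p ∈ cs, p.2 = tc p.1)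
    (d : PySem.Dict String (PySem.Dict String Int)) (h : pvWf st ws d)
    (q : String × String) (hq : pvG st ws q) :
    pvVal (cs.foldl (fun acc ic => pvTripleStep ic.1 ic.2 acc) d) q =
      if q ∈ cs.map Prod.fst then tc q else pvVal d q := by
  induction cs generalizing d with
  | nil => simp
  | cons ic cs ih =>
      simp only [List.map_cons, List.nodup_cons] at hnd
      simp only [List.foldl_cons]
      rw [pv_tripleStep_eq st ws d h]
      rw [ih hnd.2 (fun x hx => hc x (List.mem_cons_of_mem _ hx)) _
        (pv_wf_modIns st ws d h ic.1 _)]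
      by_cases hin : q ∈ cs.map Prod.fst
      · rw [if_pos hin, if_pos (by simp [hin])]
      · rw [if_neg hin]
        rw [pv_val_modIns st ws d h ic.1 _ q]
        by_cases he : q = ic.1
        · rw [if_pos ⟨he, he ▸ hq⟩]
          rw [if_pos (by simp [he])]
          rw [hc ic List.mem_cons_self, he]
        · rw [if_neg (fun hx => he hx.1)]
          rw [if_neg (by simp [he, hin])]
theorem pv_dict_ext (st ws : List String) (dA dB : PySem.Dict String (PySem.Dict String Int))
    (hA : pvWf st ws dA) (hB : pvWf st ws dB)
    (hval : ∀ q : String × String, pvG st ws q → pvVal dA q = pvVal dB q) : dA = dB := by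
  apply PySem.Dict.ext
  rw [PySem.Dict.items_eq_map_keys dA (by rw [hA.1]; exact PySem.Set.nodup_ofList _) PySem.Dict.empty,
      PySem.Dict.items_eq_map_keys dB (by rw [hB.1]; exact PySem.Set.nodup_ofList _) PySem.Dict.empty,
      hA.1, hB.1]
  apply List.map_congr_left
  intro o ho
  have ho' : o ∈ st := (PySem.Set.mem_ofList _ _).mp ho
  refine congrArg (Prod.mk _) ?_
  apply PySem.Dict.ext
  rw [PySem.Dict.items_eq_map_keys (dA.getD o PySem.Dict.empty)
        (by rw [hA.2 o ho]; exact PySem.Set.nodup_ofList _) 0,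
      PySem.Dict.items_eq_map_keys (dB.getD o PySem.Dict.empty)
        (by rw [hB.2 o ho]; exact PySem.Set.nodup_ofList _) 0,
      hA.2 o ho, hB.2 o ho]
  apply List.map_congr_left
  intro l hl
  have hl' : l ∈ ws := (PySem.Set.mem_ofList _ _).mp hl
  refine congrArg (Prod.mk _) ?_
  exact hval (o, l) ⟨ho', hl'⟩

theorem pv_correct_eq (label word st : List String) :
    (PySem.Dict.counter (label.zip word)).items.foldl
        (fun acc ic => pvTripleStep ic.1 ic.2 acc) (pvOuter word st 0) =
      (label.zip word).foldl pvBStep (pvOuter word st 0) := by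
  have h0 : pvWf st word (pvOuter word st 0) := pv_wf_outer st word 0
  apply pv_dict_ext st word _ _
    (pv_wf_foldA st word ((PySem.Dict.counter (label.zip word)).items) (pvOuter word st 0) h0)
    (pv_wf_foldB st word (label.zip word) (pvOuter word st 0) h0)
  intro q hq
  have hfst : ((PySem.Dict.counter (label.zip word)).items.map Prod.fst) =
      PySem.Set.ofList (label.zip word) := by
    rw [PySem.Dict.items_counter]
    simp [List.map_map, Function.comp_def]
  have hvalA := pv_val_foldA st word (fun q => ((label.zip word).count q : Int))
    ((PySem.Dict.counter (label.zip word)).items)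
    (by rw [hfst]; exact PySem.Set.nodup_ofList _)
    (by intro p hp
        rw [PySem.Dict.items_counter] at hp
        obtain ⟨k, _, rfl⟩ := List.mem_map.mp hp
        rfl)
    (pvOuter word st 0) h0 q hq
  have hvalB := pv_val_foldB st word (label.zip word) (pvOuter word st 0) h0 q
  rw [hvalA, hvalB, pv_val_outer0, hfst]
  by_cases hmem : q ∈ label.zip word
  · rw [if_pos ((PySem.Set.mem_ofList _ _).mpr hmem), if_pos hq]
    ring
  · rw [if_neg (fun hx => hmem ((PySem.Set.mem_ofList _ _).mp hx)), if_pos hq]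
    rw [List.count_eq_zero_of_not_mem hmem]
    simp

-- ===== VERDICT (by name: the statement is the Claim_ definition above) =====
theorem build_feature_space_model_1_spec : Claim_equal_build_feature_space_model_1 := by
  intro label word st _
  unfold Spec_build_feature_space_model_1 build_feature_space_model_1 build_feature_space_model_1_alt
  simp only [pv_correct_eq]
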